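-- pv_equiv track=rewrite | github.com/SUNET/pyXMLSecurity | src/xmlsec/__init__.py | b642pem
-- ===== SOURCE A (Python) =====
-- def b642pem(data):
--     x = data
--     r = "-----BEGIN CERTIFICATE-----\n"
--     while len(x) > 64:
--         r += x[0:64]
--         r += "\n"
--         x = x[64:]
--     r += x
--     r += "\n"
--     r += "-----END CERTIFICATE-----"
--     return r
-- ===== SOURCE B (Python) =====
-- def b642pem(data):
--     chunks = [data[i:i + 64] for i in range(0, len(data), 64)]
--     return ("-----BEGIN CERTIFICATE-----\n"
--             + "\n".join(chunks)
--             + "\n-----END CERTIFICATE-----")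
-- ===== Notes on version B (the rewrite author's own statement) =====
-- stated objective: simpler
-- what changed: Replaces A's while-loop that repeatedly re-slices the remaining string and special-cases the final remainder with a uniform chunk list built by an indexed range and a single newline-join.
import Mathlib
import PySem

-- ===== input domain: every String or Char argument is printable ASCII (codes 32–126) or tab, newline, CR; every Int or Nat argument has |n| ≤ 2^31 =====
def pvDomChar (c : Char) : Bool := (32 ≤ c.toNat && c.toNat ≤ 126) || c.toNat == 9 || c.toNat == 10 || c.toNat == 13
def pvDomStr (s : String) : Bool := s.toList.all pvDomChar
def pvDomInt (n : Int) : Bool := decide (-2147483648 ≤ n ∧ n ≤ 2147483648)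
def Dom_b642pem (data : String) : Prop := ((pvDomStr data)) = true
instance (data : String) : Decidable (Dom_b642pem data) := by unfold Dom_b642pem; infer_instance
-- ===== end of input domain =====

-- B formats the 64-char PEM lines with one indexed chunk list and a join instead of
-- A's pointer-slicing while-loop with a special last chunk; objective: simpler.

-- ===== PORT A =====
-- the while-loop: consume 64-char slices while more than 64 chars remain,
-- then append the remainder and a final newline
def b642pemGo (x r : List Char) : List Char :=
  if 64 < x.length then
    b642pemGo (PySem.List.slice x (some 64) none)
      (r ++ PySem.List.slice x (some 0) (some 64) ++ ['\n'])
  else r ++ x ++ ['\n']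
termination_by x.length
decreasing_by
  rw [PySem.List.slice_from x (by norm_num)]
  simp only [List.length_drop]
  omega

def b642pem (data : String) : String :=
  String.ofList
    (b642pemGo data.toList "-----BEGIN CERTIFICATE-----\n".toList
      ++ "-----END CERTIFICATE-----".toList)

-- ===== PORT B =====
def b642pem_alt (data : String) : String :=
  let l := data.toList
  let chunks := (PySem.List.pyRange 0 (l.length : Int) 64).map
    (fun i => PySem.List.slice l (some i) (some (i + 64)))
  String.ofList
    ("-----BEGIN CERTIFICATE-----\n".toList
      ++ PySem.Chars.join ['\n'] chunks
      ++ "\n-----END CERTIFICATE-----".toList)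

-- ===== PRECONDITION & SPEC =====
def Spec_b642pem (data : String) (out : String) : Prop := out = b642pem_alt data
instance (data : String) (out : String) : Decidable (Spec_b642pem data out) := by unfold Spec_b642pem; infer_instance

-- ===== CLAIM (what is proved, stated in full; the proofs are below) =====
def Claim_equal_b642pem : Prop := ∀ (data : String), Dom_b642pem data → Spec_b642pem data (b642pem data)

-- ===== LEMMAS AND PROOFS =====

-- B's chunk list, as a named abbreviation for the proofs
def pvChunks (l : List Char) : List (List Char) :=
  (PySem.List.pyRange 0 (l.length : Int) 64).map
    (fun i => PySem.List.slice l (some i) (some (i + 64)))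

lemma pvChunks_nil : pvChunks [] = [] := by decide

lemma pvChunks_small (x : List Char) (h0 : 0 < x.length) (h : x.length ≤ 64) :
    pvChunks x = [x] := by
  unfold pvChunks
  rw [PySem.List.pyRange_of_pos 0 _ (by norm_num)]
  rw [if_pos (by exact_mod_cast h0)]
  have : (((x.length : Int) - 0 + 64 - 1) / 64).toNat = 1 := by
    have hx : ((x.length : Int) - 0 + 64 - 1) = ((x.length + 63 : Nat) : Int) := by push_cast; ring
    rw [hx]
    rw [show ((64 : Int)) = ((64 : Nat) : Int) from rfl, ← Int.natCast_div]
    rw [Int.toNat_natCast]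
    omega
  rw [this]
  simp only [List.range_one, List.map_cons, List.map_nil]
  have : PySem.List.slice x (some (0 + 64 * ((0 : Nat) : Int))) (some (0 + 64 * ((0 : Nat) : Int) + 64)) = x := by
    norm_num
    rw [PySem.List.slice_to x (by norm_num)]
    norm_num
    exact h
  rw [this]

lemma pvChunks_shift (x : List Char) (h : 64 < x.length) :
    pvChunks x = x.take 64 :: pvChunks (x.drop 64) := by
  unfold pvChunks
  rw [PySem.List.pyRange_of_pos 0 _ (by norm_num),
      PySem.List.pyRange_of_pos 0 _ (by norm_num)]
  rw [if_pos (by exact_mod_cast Nat.lt_of_le_of_lt (Nat.zero_le _) h)]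
  rw [if_pos (by simp only [List.length_drop]; exact_mod_cast (by omega : (0:Int) < ((x.length - 64 : Nat) : Int)))]
  have key : ∀ (m : Nat), (((m : Int) - 0 + 64 - 1) / 64).toNat = (m + 63) / 64 := by
    intro m
    have hx : ((m : Int) - 0 + 64 - 1) = ((m + 63 : Nat) : Int) := by push_cast; ring
    rw [hx, show ((64 : Int)) = ((64 : Nat) : Int) from rfl, ← Int.natCast_div, Int.toNat_natCast]
  rw [key, key]
  simp only [List.length_drop]
  have hm : (x.length + 63) / 64 = (x.length - 64 + 63) / 64 + 1 := by
    have h1 : x.length + 63 = (x.length - 64 + 63) + 64 := by omega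
    rw [h1, Nat.add_div_right _ (by norm_num)]
  rw [hm, List.range_succ_eq_map]
  simp only [List.map_cons, List.map_map]
  congr 1
  · -- head chunk
    norm_num
    rw [PySem.List.slice_to x (by norm_num)]
    rfl
  · -- tail chunks
    apply List.map_congr_left
    intro k _
    simp only [Function.comp]
    have e1 : (0 : Int) + 64 * ((k + 1 : Nat) : Int) = ((64 * (k + 1) : Nat) : Int) := by push_cast; ring
    have e2 : (0 : Int) + 64 * ((k + 1 : Nat) : Int) + 64 = ((64 * (k + 1) + 64 : Nat) : Int) := by push_cast; ring
    have e3 : (0 : Int) + 64 * ((k : Nat) : Int) = ((64 * k : Nat) : Int) := by push_cast; ring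
    have e4 : (0 : Int) + 64 * ((k : Nat) : Int) + 64 = ((64 * k + 64 : Nat) : Int) := by push_cast; ring
    rw [e2, e1, e4, e3, PySem.List.slice_natCast, PySem.List.slice_natCast]
    rw [List.drop_drop]
    congr 1
    · omega
    · congr 1; omega

lemma pvChunks_ne_nil (x : List Char) (h0 : 0 < x.length) : pvChunks x ≠ [] := by
  unfold pvChunks
  rw [PySem.List.pyRange_of_pos 0 _ (by norm_num)]
  rw [if_pos (by exact_mod_cast h0)]
  have : (((x.length : Int) - 0 + 64 - 1) / 64).toNat ≠ 0 := by
    have hx : ((x.length : Int) - 0 + 64 - 1) = ((x.length + 63 : Nat) : Int) := by push_cast; ring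
    rw [hx, show ((64 : Int)) = ((64 : Nat) : Int) from rfl, ← Int.natCast_div, Int.toNat_natCast]
    omega
  simp only [ne_eq, List.map_eq_nil_iff, List.range_eq_nil]
  exact this

lemma go_eq_aux (n : Nat) : ∀ x r : List Char, x.length ≤ n →
    b642pemGo x r = r ++ PySem.Chars.join ['\n'] (pvChunks x) ++ ['\n'] := by
  induction n with
  | zero =>
    intro x r h
    have hx : x = [] := List.length_eq_zero_iff.mp (Nat.le_zero.mp h)
    subst hx
    rw [b642pemGo, if_neg (by norm_num), pvChunks_nil, PySem.Chars.join_nil]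
  | succ n ih =>
    intro x r h
    rw [b642pemGo]
    by_cases hx : 64 < x.length
    · rw [if_pos hx]
      rw [PySem.List.slice_from x (by norm_num)]
      rw [show ((64 : Int)).toNat = 64 from rfl]
      rw [ih (x.drop 64) _ (by simp only [List.length_drop]; omega)]
      rw [pvChunks_shift x hx]
      have hne : pvChunks (x.drop 64) ≠ [] := by
        apply pvChunks_ne_nil
        simp only [List.length_drop]; omega
      obtain ⟨q, rest, hqr⟩ := List.exists_cons_of_ne_nil hne
      rw [hqr, PySem.Chars.join_cons_cons]
      have hsl : PySem.List.slice x (some 0) (some 64) = x.take 64 := by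
        rw [PySem.List.slice_zero_start, PySem.List.slice_to x (by norm_num)]
        rfl
      rw [hsl]
      simp [List.append_assoc]
    · rw [if_neg hx]
      rcases Nat.eq_zero_or_pos x.length with h0 | h0
      · have hx0 : x = [] := List.length_eq_zero_iff.mp h0
        subst hx0
        rw [pvChunks_nil, PySem.Chars.join_nil]
      · rw [pvChunks_small x h0 (by omega), PySem.Chars.join_singleton]

lemma go_eq (x r : List Char) :
    b642pemGo x r = r ++ PySem.Chars.join ['\n'] (pvChunks x) ++ ['\n'] :=
  go_eq_aux x.length x r le_rfl

-- ===== VERDICT (by name: the statement is the Claim_ definition above) =====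
theorem b642pem_spec : Claim_equal_b642pem := by
  intro data _
  unfold Spec_b642pem b642pem b642pem_alt
  rw [go_eq]
  show String.ofList _ = String.ofList _
  congr 1
  simp [pvChunks, List.append_assoc]
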